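-- pv_equiv track=rewrite | github.com/panming1224/testyd | dremio_api_server_enhanced.py | _smart_split_path
-- ===== SOURCE A (Python) =====
-- def _smart_split_path(path):
--     """智能分割路径，保持引号完整性"""
--     parts = []
--     current_part = ""
--     in_quotes = False
--     i = 0
--
--     while i < len(path):
--         char = path[i]
--
--         if char == '"':
--             in_quotes = not in_quotes
--             current_part += char
--         elif char == '.' and not in_quotes:
--             if current_part:
--                 parts.append(current_part)
--                 current_part = ""
--         else:
--             current_part += char
--
--         i += 1
--
--     # 添加最后一部分
--     if current_part:
--         parts.append(current_part)
--
--     return parts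
-- ===== SOURCE B (Python) =====
-- def _smart_split_path(path):
--     """Split on dots, then re-join segments whose accumulated quote count is odd."""
--     parts = []
--     buf = None
--     for seg in path.split('.'):
--         buf = seg if buf is None else buf + '.' + seg
--         if buf.count('"') % 2 == 0:
--             if buf:
--                 parts.append(buf)
--             buf = None
--     if buf is not None and buf:
--         parts.append(buf)
--     return parts
-- ===== Notes on version B (the rewrite author's own statement) =====
-- stated objective: faster
-- what changed: Replaces A's per-character index loop with an in_quotes flag and repeated string concatenation by splitting the string on every dot and re-joining adjacent segments while the accumulated quote count is odd.
import Mathlib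
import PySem

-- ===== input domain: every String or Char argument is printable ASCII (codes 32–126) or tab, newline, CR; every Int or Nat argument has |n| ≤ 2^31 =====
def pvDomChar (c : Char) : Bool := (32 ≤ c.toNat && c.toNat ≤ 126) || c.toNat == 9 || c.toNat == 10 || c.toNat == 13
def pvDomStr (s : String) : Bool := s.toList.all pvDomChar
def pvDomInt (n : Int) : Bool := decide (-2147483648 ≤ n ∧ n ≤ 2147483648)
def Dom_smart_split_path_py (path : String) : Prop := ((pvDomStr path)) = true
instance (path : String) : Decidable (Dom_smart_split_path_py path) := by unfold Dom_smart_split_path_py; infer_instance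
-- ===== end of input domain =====

-- B replaces A's per-character scan with an in_quotes flag by "split on every dot, then
-- re-join segments while the accumulated quote count is odd" (measured faster: bulk
-- split/count instead of per-character Python steps and string concatenation).

-- ===== PORT A =====
-- A's while loop over indices, as a recursion over the character list with the same
-- state (parts, current_part, in_quotes); current_part is kept as a List Char.
def pvALoop : List Char → List String → List Char → Bool → List String
  | [], parts, cur, _ => if cur ≠ [] then parts ++ [String.ofList cur] else parts
  | c :: rest, parts, cur, inq =>
    if c = '"' then pvALoop rest parts (cur ++ [c]) (!inq)
    else if c = '.' ∧ inq = false then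
      pvALoop rest (if cur ≠ [] then parts ++ [String.ofList cur] else parts) [] inq
    else pvALoop rest parts (cur ++ [c]) inq

def smart_split_path_py (path : String) : List String :=
  pvALoop path.toList [] [] false

-- ===== PORT B =====
-- Source B's loop body: merge the next segment into buf (rejoining with the dot that was
-- split away), flush buf when its quote count is even. Segments are char lists;
-- path.split('.') is ported as List.splitOn '.' on the char list.
def pvBStep (st : List String × Option (List Char)) (seg : List Char) :
    List String × Option (List Char) :=
  let buf' := match st.2 with | none => seg | some b => b ++ '.' :: seg
  if buf'.count '"' % 2 = 0 then
    (if buf' ≠ [] then st.1 ++ [String.ofList buf'] else st.1, none)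
  else (st.1, some buf')

def smart_split_path_py_alt (path : String) : List String :=
  let st := (path.toList.splitOn '.').foldl pvBStep ([], none)
  match st.2 with
  | some b => if b ≠ [] then st.1 ++ [String.ofList b] else st.1
  | none => st.1

-- ===== PRECONDITION & SPEC =====
def Spec_smart_split_path_py (path : String) (out : List String) : Prop := out = smart_split_path_py_alt path
instance (path : String) (out : List String) : Decidable (Spec_smart_split_path_py path out) := by unfold Spec_smart_split_path_py; infer_instance

-- ===== CLAIM (what is proved, stated in full; the proofs are below) =====
def Claim_equal_smart_split_path_py : Prop := ∀ (path : String), Dom_smart_split_path_py path → Spec_smart_split_path_py path (smart_split_path_py path)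

-- ===== LEMMAS AND PROOFS =====

-- B's final flush of a leftover odd-quote buffer.
def pvFinish (st : List String × Option (List Char)) : List String :=
  match st.2 with
  | some b => if b ≠ [] then st.1 ++ [String.ofList b] else st.1
  | none => st.1

-- B fused to a character recursion: seg is the partial current segment.
def pvBrun : List Char → List String → Option (List Char) → List Char → List String
  | [], parts, buf, seg => pvFinish (pvBStep (parts, buf) seg)
  | c :: rest, parts, buf, seg =>
    if c = '.' then
      pvBrun rest (pvBStep (parts, buf) seg).1 (pvBStep (parts, buf) seg).2 []
    else pvBrun rest parts buf (seg ++ [c])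

-- A's current_part in terms of B's state: buf, the dot split away, then seg.
def pvJoin : Option (List Char) → List Char → List Char
  | none, seg => seg
  | some b, seg => b ++ '.' :: seg

lemma pvBrun_eq (l : List Char) : ∀ (parts : List String) (buf : Option (List Char))
    (seg : List Char),
    pvBrun l parts buf seg =
      pvFinish (((seg ++ (l.splitOn '.').headI) :: (l.splitOn '.').tail).foldl pvBStep
        (parts, buf)) := by
  induction l with
  | nil => intro parts buf seg; simp [pvBrun, List.splitOn, List.splitOnP_nil, List.foldl]
  | cons c rest ih =>
    intro parts buf seg
    by_cases hc : c = '.'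
    · subst hc
      have hne := List.splitOnP_ne_nil (fun x => x == '.') rest
      obtain ⟨s, ss, hs⟩ : ∃ s ss, rest.splitOn '.' = s :: ss := by
        cases h : rest.splitOn '.' with
        | nil => exact absurd h hne
        | cons a b => exact ⟨a, b, rfl⟩
      simp [pvBrun, ih, List.splitOn, List.splitOnP_cons, List.foldl]
      simp [List.splitOn] at hs
      simp [hs]
    · have hbeq : (c == '.') = false := by simp [hc]
      have hne := List.splitOnP_ne_nil (fun x => x == '.') rest
      obtain ⟨s, ss, hs⟩ : ∃ s ss, rest.splitOn '.' = s :: ss := by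
        cases h : rest.splitOn '.' with
        | nil => exact absurd h hne
        | cons a b => exact ⟨a, b, rfl⟩
      simp [List.splitOn] at hs
      simp [pvBrun, hc, ih, List.splitOn, List.splitOnP_cons, hbeq, hs, List.modifyHead]

-- count of '"' forces nonemptiness when odd
lemma pvOdd_ne_nil {cur : List Char} (h : cur.count '"' % 2 = 1) : cur ≠ [] := by
  intro hnil; subst hnil; simp at h

lemma pvCount_append_quote (cur : List Char) :
    (cur ++ ['"']).count '"' = cur.count '"' + 1 := by
  simp [List.count_append]

lemma pvCount_append_other (cur : List Char) {c : Char} (h : c ≠ '"') :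
    (cur ++ [c]).count '"' = cur.count '"' := by
  simp [List.count_append, h]

-- Main invariant: A's loop from state (parts, pvJoin buf seg, parity flag) computes
-- the same result as the fused form of B from state (parts, buf, seg).
lemma pvMain (l : List Char) : ∀ (parts : List String) (buf : Option (List Char))
    (seg : List Char), (∀ b, buf = some b → b.count '"' % 2 = 1) →
    pvALoop l parts (pvJoin buf seg) (decide ((pvJoin buf seg).count '"' % 2 = 1)) =
      pvBrun l parts buf seg := by
  induction l with
  | nil =>
    intro parts buf seg hb
    rcases hpar : decide ((pvJoin buf seg).count '"' % 2 = 1) with _ | _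
    · simp at hpar
      have h0 : (pvJoin buf seg).count '"' % 2 = 0 := by omega
      have hstep : pvBStep (parts, buf) seg =
          (if pvJoin buf seg = [] then parts
            else parts ++ [String.ofList (pvJoin buf seg)], none) := by
        cases buf <;> simp [pvBStep, pvJoin] at h0 ⊢ <;> simp [h0]
      simp [pvALoop, pvBrun, hstep, pvFinish]
    · simp at hpar
      have hne := pvOdd_ne_nil hpar
      have h0 : ¬ ((pvJoin buf seg).count '"' % 2 = 0) := by omega
      have hstep : pvBStep (parts, buf) seg = (parts, some (pvJoin buf seg)) := by
        cases buf <;> simp [pvBStep, pvJoin] at h0 ⊢ <;> simp [h0]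
      simp [pvALoop, pvBrun, hstep, pvFinish, hne]
  | cons c rest ih =>
    intro parts buf seg hb
    by_cases hq : c = '"'
    · subst hq
      have hjoin : pvJoin buf (seg ++ ['"']) = pvJoin buf seg ++ ['"'] := by
        cases buf <;> simp [pvJoin]
      have hcnt := pvCount_append_quote (pvJoin buf seg)
      have hthis := ih parts buf (seg ++ ['"']) hb
      rw [hjoin, hcnt] at hthis
      have hflip : decide (((pvJoin buf seg).count '"' + 1) % 2 = 1) =
          !decide ((pvJoin buf seg).count '"' % 2 = 1) := by
        rcases h : decide ((pvJoin buf seg).count '"' % 2 = 1) with _ | _ <;>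
          simp_all <;> omega
      rw [hflip] at hthis
      simpa [pvALoop, pvBrun] using hthis
    · by_cases hd : c = '.'
      · subst hd
        rcases hpar : decide ((pvJoin buf seg).count '"' % 2 = 1) with _ | _
        · -- not in quotes: A flushes; B's step flushes (even parity)
          simp at hpar
          have h0 : (pvJoin buf seg).count '"' % 2 = 0 := by omega
          have hstep : pvBStep (parts, buf) seg =
              (if pvJoin buf seg = [] then parts
                else parts ++ [String.ofList (pvJoin buf seg)], none) := by
            cases buf <;> simp [pvBStep, pvJoin] at h0 ⊢ <;> simp [h0]
          have hthis := ih (if pvJoin buf seg = [] then parts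
              else parts ++ [String.ofList (pvJoin buf seg)]) none []
            (by intro b hbb; cases hbb)
          have h2 : pvJoin none ([] : List Char) = [] := rfl
          rw [h2] at hthis
          have h3 : decide ((List.count '"' ([] : List Char)) % 2 = 1) = false := by decide
          rw [h3] at hthis
          simp only [pvALoop, pvBrun, hstep]
          simpa using hthis
        · -- in quotes: A keeps the dot; B's step stores the odd buffer
          simp at hpar
          have h0 : ¬ ((pvJoin buf seg).count '"' % 2 = 0) := by omega
          have hstep : pvBStep (parts, buf) seg = (parts, some (pvJoin buf seg)) := by
            cases buf <;> simp [pvBStep, pvJoin] at h0 ⊢ <;> simp [h0]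
          have hthis := ih parts (some (pvJoin buf seg)) []
            (by intro b hbb; cases hbb; exact hpar)
          have hjoin : pvJoin (some (pvJoin buf seg)) [] = pvJoin buf seg ++ ['.'] := by
            simp [pvJoin]
          rw [hjoin] at hthis
          have hcnt : (pvJoin buf seg ++ ['.']).count '"' = (pvJoin buf seg).count '"' := by
            simp [List.count_append]
          rw [hcnt] at hthis
          have hdec : decide ((pvJoin buf seg).count '"' % 2 = 1) = true := by
            simp [hpar]
          rw [hdec] at hthis
          simp only [pvALoop, pvBrun, hstep]
          simpa using hthis
      · -- ordinary character: both append it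
        have hjoin : pvJoin buf (seg ++ [c]) = pvJoin buf seg ++ [c] := by
          cases buf <;> simp [pvJoin]
        have hcnt := pvCount_append_other (pvJoin buf seg) hq
        have hthis := ih parts buf (seg ++ [c]) hb
        rw [hjoin, hcnt] at hthis
        simpa [pvALoop, pvBrun, hq, hd] using hthis

-- ===== VERDICT (by name: the statement is the Claim_ definition above) =====
theorem smart_split_path_py_spec : Claim_equal_smart_split_path_py := by
  intro path _
  unfold Spec_smart_split_path_py smart_split_path_py smart_split_path_py_alt
  have hmain := pvMain path.toList [] none [] (by intro b hbb; cases hbb)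
  have h2 : pvJoin none ([] : List Char) = [] := rfl
  rw [h2] at hmain
  have h3 : decide ((List.count '"' ([] : List Char)) % 2 = 1) = false := by decide
  rw [h3] at hmain
  rw [hmain, pvBrun_eq]
  have hne := List.splitOnP_ne_nil (fun x => x == '.') path.toList
  obtain ⟨s, ss, hs⟩ : ∃ s ss, path.toList.splitOn '.' = s :: ss := by
    cases h : path.toList.splitOn '.' with
    | nil => simp [List.splitOn] at h; exact absurd h hne
    | cons a b => exact ⟨a, b, rfl⟩
  simp only [hs, List.headI, List.tail, List.nil_append, pvFinish]
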